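-- pv_equiv track=rewrite | github.com/sticky-ai/Algorithms | categories/data_structures/arrays/commonCharacterCount2.py | commonCharacterCount2
-- ===== SOURCE A (Python) =====
-- def commonCharacterCount2(s):
--     char = set(s[0])
--
--     res = []
--     for i in s:
--         temp = []
--         for c in char:
--             temp.append(i.count(c))
--         res.append(temp)
--
--     cnt = 0
--     for z in zip(*res):
--         if 0 in z:
--             continue
--
--         cnt += min(z)
--
--     return cnt
-- ===== SOURCE B (Python) =====
-- from collections import Counter
--
-- def commonCharacterCount2(s):
--     c = Counter(s[0])
--     for t in s[1:]:
--         c &= Counter(t)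
--     return sum(c.values())
-- ===== Notes on version B (the rewrite author's own statement) =====
-- stated objective: idiomatic
-- what changed: Replaced the count matrix plus zip-transpose with a single fold over the strings maintaining a running Counter intersection (Counter &), summing its values at the end.
-- outside the precondition, e.g. on commonCharacterCount2([]): A raises IndexError, B raises IndexError
import Mathlib
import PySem

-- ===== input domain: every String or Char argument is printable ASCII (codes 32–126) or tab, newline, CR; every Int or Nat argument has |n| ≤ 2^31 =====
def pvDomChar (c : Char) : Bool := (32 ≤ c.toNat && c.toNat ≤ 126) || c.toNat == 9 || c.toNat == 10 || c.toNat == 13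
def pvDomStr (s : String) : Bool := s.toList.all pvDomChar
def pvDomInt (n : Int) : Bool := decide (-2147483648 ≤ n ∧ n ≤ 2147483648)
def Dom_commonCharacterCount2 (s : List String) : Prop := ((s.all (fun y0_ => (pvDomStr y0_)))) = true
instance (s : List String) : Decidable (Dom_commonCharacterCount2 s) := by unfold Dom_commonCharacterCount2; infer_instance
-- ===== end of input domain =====

-- B replaces A's count matrix and zip-transpose by a single fold over the strings
-- maintaining a running Counter intersection (Counter &), for a simpler one-pass decomposition.


-- ===== PORT A =====
def commonCharacterCount2 (s : List String) : Int :=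
  -- char = set(s[0]); s[0] raises IndexError on s = [] — excluded by Pre_
  let char : PySem.Set Char := PySem.Set.ofList (((PySem.List.pyGet? s 0).getD "").toList)
  -- i.count(c): for a single-character needle c, str.count is exactly the number of occurrences of c (hand port, exact)
  let res : List (List Int) :=
    s.foldl (fun res i => res ++ [char.foldl (fun temp c => temp ++ [(i.toList.count c : Int)]) []]) []
  -- zip(*res) hand-ported: every row of res has length char.length, so zip(*res) is the list of columns j < char.length
  let cols : List (List Int) := (List.range char.length).map (fun j => res.map (fun row => row.getD j 0))
  cols.foldl (fun cnt z => if (0 : Int) ∈ z then cnt else cnt + ((PySem.List.min? z (fun x => x)).getD 0)) 0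

-- ===== PORT B =====
-- Counter & Counter, as CPython's Counter.__and__: iterate the left counter's items,
-- keep each key with min(count, other[key]) whenever that minimum is positive.
def pvCounterAnd (d e : PySem.Dict Char Int) : PySem.Dict Char Int :=
  d.items.foldl (fun r kv =>
    let m := min kv.2 (e.getD kv.1 0)
    if 0 < m then r.insert kv.1 m else r) PySem.Dict.empty

def commonCharacterCount2_alt (s : List String) : Int :=
  -- c = Counter(s[0]); for t in s[1:]: c &= Counter(t); return sum(c.values())
  let c0 : PySem.Dict Char Int := PySem.Dict.counter (((PySem.List.pyGet? s 0).getD "").toList)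
  let c := (PySem.List.slice s (some 1) none).foldl
    (fun c t => pvCounterAnd c (PySem.Dict.counter t.toList)) c0
  c.values.sum

-- ===== PRECONDITION & SPEC =====
-- Pre_ excludes only s = [], where both A and B raise IndexError on s[0].
def Pre_commonCharacterCount2 (s : List String) : Prop := s ≠ []
instance (s : List String) : Decidable (Pre_commonCharacterCount2 s) := by unfold Pre_commonCharacterCount2; infer_instance
def pvWitness_commonCharacterCount2 : List String := ["aabcc", "adcaa", "acdba"]

def Spec_commonCharacterCount2 (s : List String) (out : Int) : Prop := out = commonCharacterCount2_alt s
instance (s : List String) (out : Int) : Decidable (Spec_commonCharacterCount2 s out) := by unfold Spec_commonCharacterCount2; infer_instance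

-- ===== CLAIM (what is proved, stated in full; the proofs are below) =====
def Claim_equal_commonCharacterCount2 : Prop := ∀ (s : List String), Dom_commonCharacterCount2 s → Pre_commonCharacterCount2 s → Spec_commonCharacterCount2 s (commonCharacterCount2 s)

-- ===== LEMMAS AND PROOFS =====

-- occurrence count of c in string t, as an Int
def pvMCount (c : Char) (t : String) : Int := (t.toList.count c : Int)

-- running minimum of the counts of c over ts, started at v
def pvRunMin (c : Char) (v : Int) (ts : List String) : Int :=
  ts.foldl (fun m t => min m (pvMCount c t)) v

lemma pvMCount_nonneg (c : Char) (t : String) : 0 ≤ pvMCount c t := Int.natCast_nonneg _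

lemma pvRunMin_nonneg (c : Char) (ts : List String) : ∀ v, 0 ≤ v → 0 ≤ pvRunMin c v ts := by
  induction ts with
  | nil => intro v hv; exact hv
  | cons t ts ih =>
    intro v hv
    exact ih _ (le_min hv (pvMCount_nonneg c t))

lemma pvRunMin_le (c : Char) (ts : List String) : ∀ v, pvRunMin c v ts ≤ v := by
  induction ts with
  | nil => intro v; exact le_refl v
  | cons t ts ih =>
    intro v
    exact le_trans (ih _) (min_le_left _ _)

lemma pvRunMin_le_mem (c : Char) (ts : List String) :
    ∀ v, ∀ t' ∈ ts, pvRunMin c v ts ≤ pvMCount c t' := by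
  induction ts with
  | nil => intro v t' h; cases h
  | cons t ts ih =>
    intro v t' h
    rcases List.mem_cons.mp h with rfl | h
    · exact le_trans (pvRunMin_le c ts _) (min_le_right _ _)
    · exact ih _ t' h

lemma pvRunMin_mem (c : Char) (ts : List String) :
    ∀ v, pvRunMin c v ts = v ∨ ∃ t' ∈ ts, pvRunMin c v ts = pvMCount c t' := by
  induction ts with
  | nil => intro v; exact Or.inl rfl
  | cons t ts ih =>
    intro v
    rcases ih (min v (pvMCount c t)) with h | ⟨t', ht', h⟩
    · show pvRunMin c (min v (pvMCount c t)) ts = v ∨ _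
      rcases min_cases v (pvMCount c t) with ⟨he, _⟩ | ⟨he, _⟩
      · exact Or.inl (h.trans he)
      · exact Or.inr ⟨t, List.mem_cons_self, h.trans he⟩
    · exact Or.inr ⟨t', List.mem_cons_of_mem _ ht', h⟩

-- A's column test "0 in z; min(z)" equals the clamped running minimum
lemma pv_termA (c : Char) (t : String) (rest : List String) :
    (if (0 : Int) ∈ (pvMCount c t :: rest.map (pvMCount c)) then 0
     else pvRunMin c (pvMCount c t) rest)
    = (if 0 < pvRunMin c (pvMCount c t) rest then pvRunMin c (pvMCount c t) rest else 0) := by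
  set rm := pvRunMin c (pvMCount c t) rest with hrm
  by_cases h : (0 : Int) ∈ (pvMCount c t :: rest.map (pvMCount c))
  · -- some count is 0, so rm = 0
    have hle : rm ≤ 0 := by
      rcases List.mem_cons.mp h with h0 | h0
      · rw [hrm, ← h0]; exact pvRunMin_le c rest _
      · obtain ⟨t', ht', he⟩ := List.mem_map.mp h0
        rw [hrm]; exact he ▸ pvRunMin_le_mem c rest _ t' ht'
    have hge : 0 ≤ rm := pvRunMin_nonneg c rest _ (pvMCount_nonneg c t)
    have : rm = 0 := le_antisymm hle hge
    simp [h, this]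
  · -- all counts positive, so rm > 0
    have hpos : 0 < rm := by
      have hne : rm ≠ 0 := by
        rcases pvRunMin_mem c rest (pvMCount c t) with he | ⟨t', ht', he⟩
        · rw [hrm, he]; intro h0; exact h (by simp [← h0])
        · rw [hrm, he]; intro h0
          exact h (List.mem_cons_of_mem _ (List.mem_map.mpr ⟨t', ht', h0⟩))
      have hge : 0 ≤ rm := pvRunMin_nonneg c rest _ (pvMCount_nonneg c t)
      omega
    simp [h, hpos]


lemma pv_cols_eq (char : List Char) (f : String → Char → Int) (s : List String) :
    (List.range char.length).map (fun j => (s.map (fun i => char.map (f i))).map (fun row => row.getD j 0))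
    = char.map (fun c => s.map (fun i => f i c)) := by
  apply List.ext_getElem
  · simp
  · intro j h1 h2
    simp only [List.getElem_map, List.getElem_range, List.map_map]
    apply List.map_congr_left
    intro i _
    have hj : j < (char.map (f i)).length := by simpa using h2
    have hjc : j < char.length := by simpa using h2
    show (char.map (f i)).getD j 0 = f i (char[j]'hjc)
    rw [List.getD_eq_getElem _ _ hj, List.getElem_map]

lemma pv_A_eq (t : String) (rest : List String) :
    commonCharacterCount2 (t :: rest)
    = ((PySem.Set.ofList t.toList).map (fun c =>
        if 0 < pvRunMin c (pvMCount c t) rest then pvRunMin c (pvMCount c t) rest else 0)).sum := by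
  unfold commonCharacterCount2
  dsimp only
  have hget : (PySem.List.pyGet? (t :: rest) 0).getD "" = t := by
    simp [PySem.List.pyGet?, PySem.List.pyIdx?]
  rw [hget]
  set char : List Char := PySem.Set.ofList t.toList with hchar
  -- the count matrix res
  have hres : ((t :: rest).foldl (fun res i => res ++ [char.foldl (fun temp c => temp ++ [(i.toList.count c : Int)]) []]) [])
      = (t :: rest).map (fun i => char.map (fun c => pvMCount c i)) := by
    rw [PySem.List.foldl_append_singleton_eq_map]
    simp only [List.nil_append]
    apply List.map_congr_left
    intro i _
    rw [PySem.List.foldl_append_singleton_eq_map]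
    simp [pvMCount]
  rw [hres, pv_cols_eq char (fun i c => pvMCount c i) (t :: rest)]
  -- the counting loop as a sum over columns
  have hco : ∀ acc (z : List Int), z ∈ char.map (fun c => (t :: rest).map (fun i => pvMCount c i)) →
      (if (0 : Int) ∈ z then acc else acc + ((PySem.List.min? z (fun x => x)).getD 0))
      = acc + (if (0 : Int) ∈ z then 0 else ((PySem.List.min? z (fun x => x)).getD 0)) := by
    intro acc z _; split <;> simp
  rw [PySem.List.foldl_congr_mem (h := hco), PySem.List.foldl_add, List.map_map]
  simp only [zero_add]
  apply congrArg
  apply List.map_congr_left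
  intro c _
  show (if (0 : Int) ∈ (pvMCount c t :: rest.map (fun i => pvMCount c i)) then (0:Int)
        else (PySem.List.min? (pvMCount c t :: rest.map (fun i => pvMCount c i)) (fun x => x)).getD 0) = _
  rw [PySem.List.min?_id_cons]
  have hfm : (rest.map (fun i => pvMCount c i)).foldl min (pvMCount c t) = pvRunMin c (pvMCount c t) rest := by
    rw [List.foldl_map]; rfl
  simp only [Option.getD_some, hfm]
  simpa using pv_termA c t rest

-- Counter.__and__'s insert loop over fresh distinct keys appends its kept items
lemma pv_and_items (e : PySem.Dict Char Int) (L : List (Char × Int)) :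
    ∀ (r : PySem.Dict Char Int), (L.map Prod.fst).Nodup → (∀ kv ∈ L, r.contains kv.1 = false) →
    (L.foldl (fun r kv => let m := min kv.2 (e.getD kv.1 0); if 0 < m then r.insert kv.1 m else r) r).items
    = r.items ++ L.filterMap (fun kv =>
        if 0 < min kv.2 (e.getD kv.1 0) then some (kv.1, min kv.2 (e.getD kv.1 0)) else none) := by
  induction L with
  | nil => intro r _ _; simp
  | cons kv L ih =>
    intro r hnd hfresh
    simp only [List.map_cons, List.nodup_cons] at hnd
    simp only [List.foldl_cons, List.filterMap_cons]
    by_cases hm : 0 < min kv.2 (e.getD kv.1 0)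
    · simp only [hm, if_pos]
      rw [ih (r.insert kv.1 (min kv.2 (e.getD kv.1 0))) hnd.2 ?_]
      · rw [PySem.Dict.items_insert_of_not_contains _ _ (hfresh kv List.mem_cons_self)]
        simp
      · intro kv' h'
        rw [PySem.Dict.contains_insert]
        have h1 : (kv'.1 == kv.1) = false := by
          have : kv'.1 ∈ L.map Prod.fst := List.mem_map.mpr ⟨kv', h', rfl⟩
          simp only [beq_eq_false_iff_ne, ne_eq]
          intro hk; exact hnd.1 (hk ▸ this)
        rw [h1, hfresh kv' (List.mem_cons_of_mem _ h')]
        rfl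
    · simp only [hm, if_false]
      exact ih r hnd.2 (fun kv' h' => hfresh kv' (List.mem_cons_of_mem _ h'))

lemma pv_counterAnd_items (d e : PySem.Dict Char Int) (hnd : (d.items.map Prod.fst).Nodup) :
    (pvCounterAnd d e).items = d.items.filterMap (fun kv =>
        if 0 < min kv.2 (e.getD kv.1 0) then some (kv.1, min kv.2 (e.getD kv.1 0)) else none) := by
  have h := pv_and_items e d.items PySem.Dict.empty hnd (fun kv _ => PySem.Dict.contains_empty _)
  simpa [pvCounterAnd] using h

-- keys of the kept items form a sublist of the original keys
lemma pv_keys_filterMap_sublist (L : List (Char × Int)) (g : Char × Int → Int) :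
    (((L.filterMap (fun kv => if 0 < g kv then some (kv.1, g kv) else none)).map Prod.fst)).Sublist
      (L.map Prod.fst) := by
  induction L with
  | nil => simp
  | cons kv L ih =>
    simp only [List.filterMap_cons]
    by_cases h : 0 < g kv
    · rw [if_pos h]
      simp only [List.map_cons]
      exact ih.cons₂ _
    · rw [if_neg h]
      exact ih.cons _

lemma pv_mem_filterMap_pos (L : List (Char × Int)) (g : Char × Int → Int) :
    ∀ kv' ∈ L.filterMap (fun kv => if 0 < g kv then some (kv.1, g kv) else none), 0 < kv'.2 := by
  intro kv' h'
  obtain ⟨kv, _, hkv⟩ := List.mem_filterMap.mp h'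
  by_cases h : 0 < g kv
  · simp only [h, if_pos] at hkv
    cases hkv; exact h
  · simp [h] at hkv

lemma pv_filterMap_pos_id (L : List (Char × Int)) (hpos : ∀ kv ∈ L, 0 < kv.2) :
    L.filterMap (fun kv => if 0 < kv.2 then some (kv.1, kv.2) else none) = L := by
  induction L with
  | nil => rfl
  | cons kv L ih =>
    simp only [List.filterMap_cons, hpos kv List.mem_cons_self, if_pos]
    rw [ih (fun kv' h' => hpos kv' (List.mem_cons_of_mem _ h'))]

-- the whole B loop: running Counter-intersection keeps each key with its clamped running minimum
lemma pv_fold_and (ts : List String) :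
    ∀ (d : PySem.Dict Char Int), (d.items.map Prod.fst).Nodup → (∀ kv ∈ d.items, 0 < kv.2) →
    (ts.foldl (fun c t => pvCounterAnd c (PySem.Dict.counter t.toList)) d).items
    = d.items.filterMap (fun kv =>
        if 0 < pvRunMin kv.1 kv.2 ts then some (kv.1, pvRunMin kv.1 kv.2 ts) else none) := by
  induction ts with
  | nil =>
    intro d _ hpos
    simp only [List.foldl_nil]
    exact (pv_filterMap_pos_id d.items hpos).symm
  | cons t ts ih =>
    intro d hnd hpos
    simp only [List.foldl_cons]
    have hstep : (pvCounterAnd d (PySem.Dict.counter t.toList)).items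
        = d.items.filterMap (fun kv =>
            if 0 < min kv.2 (pvMCount kv.1 t) then some (kv.1, min kv.2 (pvMCount kv.1 t)) else none) := by
      rw [pv_counterAnd_items d _ hnd]
      apply List.filterMap_congr
      intro kv _
      rw [PySem.Dict.getD_counter]
      rfl
    rw [ih _ ?_ ?_, hstep, List.filterMap_filterMap]
    · apply List.filterMap_congr
      intro kv _
      have hrm : pvRunMin kv.1 kv.2 (t :: ts) = pvRunMin kv.1 (min kv.2 (pvMCount kv.1 t)) ts := rfl
      by_cases hm : 0 < min kv.2 (pvMCount kv.1 t)
      · simp only [hm, if_pos, Option.bind_some, hrm]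
      · have hle : pvRunMin kv.1 (min kv.2 (pvMCount kv.1 t)) ts ≤ 0 :=
          le_trans (pvRunMin_le _ _ _) (by omega)
        simp only [hm, if_false, Option.bind_none, hrm]
        rw [if_neg (by omega)]
    · rw [hstep]
      exact (pv_keys_filterMap_sublist d.items (fun kv => min kv.2 (pvMCount kv.1 t))).nodup hnd
    · rw [hstep]
      exact pv_mem_filterMap_pos d.items _
    
-- summing the kept values is summing the clamped values over all keys
lemma pv_sum_filterMap (L : List (Char × Int)) (g : Char × Int → Int) :
    ((L.filterMap (fun kv => if 0 < g kv then some (kv.1, g kv) else none)).map Prod.snd).sum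
    = (L.map (fun kv => if 0 < g kv then g kv else 0)).sum := by
  induction L with
  | nil => rfl
  | cons kv L ih =>
    by_cases h : 0 < g kv <;> simp [h, ih]

lemma pv_B_eq (t : String) (rest : List String) :
    commonCharacterCount2_alt (t :: rest)
    = ((PySem.Set.ofList t.toList).map (fun c =>
        if 0 < pvRunMin c (pvMCount c t) rest then pvRunMin c (pvMCount c t) rest else 0)).sum := by
  unfold commonCharacterCount2_alt
  dsimp only
  have hget : (PySem.List.pyGet? (t :: rest) 0).getD "" = t := by
    simp [PySem.List.pyGet?, PySem.List.pyIdx?]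
  have hslice : PySem.List.slice (t :: rest) (some 1) none = rest := by
    simp [PySem.List.slice]
  rw [hget, hslice]
  set d := PySem.Dict.counter (κ := Char) t.toList with hd
  have hitems : d.items = (PySem.Set.ofList t.toList).map (fun k => (k, (t.toList.count k : Int))) :=
    PySem.Dict.items_counter t.toList
  have hnd : (d.items.map Prod.fst).Nodup := by
    have := PySem.Dict.nodup_keys_counter (xs := t.toList) (κ := Char)
    simpa [PySem.Dict.keys] using this
  have hpos : ∀ kv ∈ d.items, 0 < kv.2 := by
    intro kv hkv
    rw [hitems] at hkv
    obtain ⟨k, hk, rfl⟩ := List.mem_map.mp hkv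
    have : k ∈ t.toList := (PySem.Set.mem_ofList _ _).mp hk
    have : 0 < t.toList.count k := List.count_pos_iff.mpr this
    simpa using this
  show ((rest.foldl (fun c t => pvCounterAnd c (PySem.Dict.counter t.toList)) d).values).sum = _
  have hv : (rest.foldl (fun c t => pvCounterAnd c (PySem.Dict.counter t.toList)) d).values
      = ((rest.foldl (fun c t => pvCounterAnd c (PySem.Dict.counter t.toList)) d).items).map Prod.snd := rfl
  rw [hv, pv_fold_and rest d hnd hpos, pv_sum_filterMap, hitems, List.map_map]
  apply congrArg
  apply List.map_congr_left
  intro c _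
  rfl


-- ===== VERDICT (by name: the statement is the Claim_ definition above) =====
theorem commonCharacterCount2_spec : Claim_equal_commonCharacterCount2 := by
  intro s _ hpre
  unfold Spec_commonCharacterCount2
  match s with
  | [] => exact absurd rfl hpre
  | t :: rest => rw [pv_A_eq, pv_B_eq]
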